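-- pv_equiv track=rewrite | github.com/lcorbel/BridgeThesis | shadow_best_player_adapted.py | _auction_complete
-- ===== SOURCE A (Python) =====
-- from typing import Dict, List, Optional, Tuple
--
-- def _is_contract_bid(tok: str) -> bool:
--     """Check if token is a contract bid."""
--     t = tok.upper()
--     return len(t) >= 2 and t[0] in "1234567" and t[1] in "CDHSN"
--
-- def _auction_complete(bids: List[str]) -> bool:
--     """Check if auction is complete (3 consecutive passes after at least one bid)."""
--     if not bids:
--         return False
--     i = len(bids) - 1
--     trailing_passes = 0
--     while i >= 0 and bids[i] == 'P':
--         trailing_passes += 1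
--         i -= 1
--     if trailing_passes < 3:
--         return False
--     return any(_is_contract_bid(b) for b in bids[:i+1])
-- ===== SOURCE B (Python) =====
-- from typing import List
--
-- def _is_contract_bid(tok: str) -> bool:
--     """Check if token is a contract bid."""
--     t = tok.upper()
--     return len(t) >= 2 and t[0] in "1234567" and t[1] in "CDHSN"
--
-- def _auction_complete(bids: List[str]) -> bool:
--     """Single forward pass: count the run of consecutive trailing passes and
--     remember whether any contract bid was seen."""
--     run = 0
--     has_bid = False
--     for tok in bids:
--         if tok == 'P':
--             run += 1
--         else:
--             run = 0
--             has_bid = has_bid or _is_contract_bid(tok)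
--     return has_bid and run >= 3
-- ===== Notes on version B (the rewrite author's own statement) =====
-- stated objective: simpler
-- what changed: Replaced A's backward while-loop over trailing passes plus a separate any() scan of the prefix by one forward pass maintaining a run counter of consecutive passes and a has-bid flag.
import Mathlib
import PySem

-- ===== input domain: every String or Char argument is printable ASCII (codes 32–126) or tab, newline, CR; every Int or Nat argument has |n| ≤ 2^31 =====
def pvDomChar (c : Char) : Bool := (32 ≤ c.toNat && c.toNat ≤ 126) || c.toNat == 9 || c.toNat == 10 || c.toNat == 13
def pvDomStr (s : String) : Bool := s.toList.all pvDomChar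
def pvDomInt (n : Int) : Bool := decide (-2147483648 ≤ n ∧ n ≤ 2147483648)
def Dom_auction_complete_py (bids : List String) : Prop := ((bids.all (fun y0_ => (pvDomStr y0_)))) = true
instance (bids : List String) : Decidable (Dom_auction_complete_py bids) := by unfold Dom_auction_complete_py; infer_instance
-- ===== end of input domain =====

-- B replaces A's backward trailing-pass scan plus separate any() pass by a single
-- forward pass maintaining a trailing-pass run counter and a has-bid flag (objective: simpler).

-- ===== PORT A =====
-- shared helper _is_contract_bid (identical in both sources)
def isContractBid (tok : String) : Bool :=
  let t := PySem.Chars.upper tok.toList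
  decide (2 ≤ t.length) && ("1234567".toList.contains (t.getD 0 ' '))
    && ("CDHSN".toList.contains (t.getD 1 ' '))

-- the 'while i >= 0 and bids[i] == "P"' loop of A; fuel n stands for index i = n - 1,
-- returns the number of trailing passes counted
def trailLoopA (bids : List String) : Nat → Nat
  | 0 => 0
  | n + 1 => if PySem.List.pyGet? bids (n : Int) = some "P" then trailLoopA bids n + 1 else 0

def auction_complete_py (bids : List String) : Bool :=
  if bids = [] then false
  else
    let trailing_passes := trailLoopA bids bids.length
    let i : Int := (bids.length : Int) - 1 - (trailing_passes : Int)
    if trailing_passes < 3 then false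
    else (PySem.List.slice bids none (some (i + 1))).any isContractBid

-- ===== PORT B =====
def auction_complete_py_alt (bids : List String) : Bool :=
  let st := bids.foldl
    (fun (s : Nat × Bool) tok =>
      if tok = "P" then (s.1 + 1, s.2) else (0, s.2 || isContractBid tok))
    (0, false)
  st.2 && decide (3 ≤ st.1)

-- ===== PRECONDITION & SPEC =====
def Spec_auction_complete_py (bids : List String) (out : Bool) : Prop := out = auction_complete_py_alt bids
instance (bids : List String) (out : Bool) : Decidable (Spec_auction_complete_py bids out) := by unfold Spec_auction_complete_py; infer_instance

-- ===== CLAIM (what is proved, stated in full; the proofs are below) =====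
def Claim_equal_auction_complete_py : Prop := ∀ (bids : List String), Dom_auction_complete_py bids → Spec_auction_complete_py bids (auction_complete_py bids)

-- ===== LEMMAS AND PROOFS =====

-- trailing-pass count, peeling from the head of the REVERSED list
def tpR : List String → Nat
  | [] => 0
  | b :: rest => if b = "P" then tpR rest + 1 else 0

theorem tpR_le (l : List String) : tpR l ≤ l.length := by
  induction l with
  | nil => simp [tpR]
  | cons b rest ih => simp only [tpR, List.length_cons]; split <;> omega

theorem tpR_append_all (l s : List String) (h : ∀ x ∈ l, x = "P") :
    tpR (l ++ s) = l.length + tpR s := by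
  induction l with
  | nil => simp
  | cons b rest ih =>
    have hb := h b (by simp)
    simp only [List.cons_append, tpR, hb, if_true, eq_self_iff_true, List.length_cons]
    rw [ih (fun x hx => h x (by simp [hx]))]
    omega

theorem tpR_append_stop (l s : List String) (h : ∃ x ∈ l, x ≠ "P") :
    tpR (l ++ s) = tpR l := by
  induction l with
  | nil => simp at h
  | cons b rest ih =>
    by_cases hb : b = "P"
    · subst hb
      have : ∃ x ∈ rest, x ≠ "P" := by
        rcases h with ⟨x, hx, hne⟩
        rcases List.mem_cons.mp hx with h1 | h2
        · exact absurd h1 hne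
        · exact ⟨x, h2, hne⟩
      simp only [List.cons_append, tpR, eq_self_iff_true, if_true, ih this]
    · simp [tpR, hb]

theorem tpR_all (l : List String) (h : ∀ x ∈ l, x = "P") : tpR l = l.length := by
  have := tpR_append_all l [] h
  simpa using this

theorem isContract_P : isContractBid "P" = false := by decide

theorem trailLoopA_eq (bids : List String) (n : Nat) (hn : n ≤ bids.length) :
    trailLoopA bids n = tpR (bids.take n).reverse := by
  induction n with
  | zero => simp [trailLoopA, tpR]
  | succ m ih =>
    have hm : m < bids.length := by omega
    have hget : PySem.List.pyGet? bids (m : Int) = some bids[m] := by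
      rw [PySem.List.pyGet?_natCast]; simp [hm]
    have htake : (bids.take (m + 1)).reverse = bids[m] :: (bids.take m).reverse := by
      rw [List.take_succ]; simp [hm]
    rw [htake]
    simp only [trailLoopA, hget, tpR, Option.some.injEq]
    rw [ih (by omega)]

-- characterisation of B's single fold
theorem foldB (l : List String) (r0 : Nat) (h0 : Bool) :
    l.foldl
      (fun (s : Nat × Bool) tok =>
        if tok = "P" then (s.1 + 1, s.2) else (0, s.2 || isContractBid tok))
      (r0, h0)
    = ((if ∀ x ∈ l, x = "P" then r0 + l.length else tpR l.reverse),
       h0 || l.any isContractBid) := by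
  induction l generalizing r0 h0 with
  | nil => simp
  | cons b rest ih =>
    rw [List.foldl_cons]
    by_cases hb : b = "P"
    · subst hb
      rw [if_pos rfl, ih]
      simp only [List.any_cons, isContract_P, Bool.false_or, List.length_cons,
        List.reverse_cons]
      by_cases hall : ∀ x ∈ rest, x = "P"
      · have hall' : ∀ x ∈ ("P" :: rest), x = "P" := by
          intro x hx
          rcases List.mem_cons.mp hx with h1 | h2
          · exact h1
          · exact hall x h2
        rw [if_pos hall, if_pos hall', Prod.mk.injEq]
        exact ⟨by omega, rfl⟩
      · have hne : ¬ ∀ x ∈ ("P" :: rest), x = "P" :=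
          fun h => hall fun x hx => h x (by simp [hx])
        rw [if_neg hall, if_neg hne,
          tpR_append_stop _ _ (by
            push_neg at hall
            rcases hall with ⟨x, hx, hxe⟩
            exact ⟨x, by simp [hx], hxe⟩)]
    · have hne : ¬ ∀ x ∈ (b :: rest), x = "P" := by
        intro h; exact hb (h b (by simp))
      rw [if_neg hb, ih]
      simp only [List.any_cons, List.reverse_cons, if_neg hne, Bool.or_assoc]
      by_cases hall : ∀ x ∈ rest, x = "P"
      · rw [if_pos hall,
          tpR_append_all _ _ (by intro x hx; exact hall x (by simpa using hx))]
        simp [tpR, hb, List.length_reverse]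
      · rw [if_neg hall,
          tpR_append_stop _ _ (by
            push_neg at hall
            rcases hall with ⟨x, hx, hxe⟩
            exact ⟨x, by simp [hx], hxe⟩)]

-- every element past position (len - trailing run) is a pass
theorem drop_trailing (l : List String) :
    ∀ x ∈ l.drop (l.length - tpR l.reverse), x = "P" := by
  induction l using List.reverseRecOn with
  | nil => simp
  | append_singleton l b ih =>
    by_cases hb : b = "P"
    · subst hb
      intro x hx
      rw [List.reverse_append] at hx
      simp only [List.reverse_cons, List.reverse_nil, List.nil_append,
        List.singleton_append, tpR, if_true, List.length_append,
        List.length_singleton] at hx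
      have hle : tpR l.reverse ≤ l.length := by
        have := tpR_le l.reverse; simpa using this
      have hsub : l.length + 1 - (tpR l.reverse + 1) = l.length - tpR l.reverse := by omega
      rw [hsub, List.drop_append] at hx
      rcases List.mem_append.mp hx with h | h
      · exact ih x h
      · have : l.length - tpR l.reverse - l.length = 0 := by omega
        rw [this] at h; simpa using h
    · intro x hx
      rw [List.reverse_append] at hx
      simp only [List.reverse_cons, List.reverse_nil, List.nil_append,
        List.singleton_append, tpR, if_neg hb, List.length_append,
        List.length_singleton, Nat.sub_zero] at hx
      rw [List.drop_eq_nil_of_le (by simp)] at hx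
      simpa using hx

theorem any_all_P (l : List String) (h : ∀ x ∈ l, x = "P") :
    l.any isContractBid = false := by
  rw [List.any_eq_false]
  intro x hx; rw [h x hx]; exact (by decide : isContractBid "P" ≠ true)

-- ===== VERDICT (by name: the statement is the Claim_ definition above) =====
theorem auction_complete_py_spec : Claim_equal_auction_complete_py := by
  intro bids _
  unfold Spec_auction_complete_py auction_complete_py auction_complete_py_alt
  rw [foldB]
  by_cases hnil : bids = []
  · subst hnil; simp [tpR]
  · rw [if_neg hnil]
    have htl : trailLoopA bids bids.length = tpR bids.reverse := by
      rw [trailLoopA_eq bids bids.length le_rfl, List.take_length]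
    by_cases hall : ∀ x ∈ bids, x = "P"
    · -- all passes: no contract bid anywhere, both sides false
      have htpall : tpR bids.reverse = bids.length := by
        rw [tpR_all bids.reverse (by intro x hx; exact hall x (by simpa using hx))]
        simp
      simp only [htl, if_pos hall, any_all_P bids hall, Bool.false_or, Bool.false_and]
      split
      · rfl
      · have hidx : (bids.length : Int) - 1 - (tpR bids.reverse : Int) + 1
            = ((0 : Nat) : Int) := by rw [htpall]; push_cast; ring
        rw [hidx, PySem.List.slice_to_natCast]
        simp
    · have hle : tpR bids.reverse ≤ bids.length := by
        have := tpR_le bids.reverse; simpa using this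
      simp only [htl, if_neg hall, Bool.false_or]
      set tp := tpR bids.reverse with htp
      by_cases h3 : tp < 3
      · rw [if_pos h3]
        have : ¬ (3 ≤ tp) := by omega
        simp [this]
      · rw [if_neg h3]
        have hidx : (bids.length : Int) - 1 - (tp : Int) + 1 = ((bids.length - tp : Nat) : Int) := by
          push_cast [Nat.cast_sub hle]; ring
        rw [hidx, PySem.List.slice_to_natCast]
        have hsplit : bids.any isContractBid
            = ((bids.take (bids.length - tp)).any isContractBid
              || (bids.drop (bids.length - tp)).any isContractBid) := by
          conv_lhs => rw [← List.take_append_drop (bids.length - tp) bids]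
          rw [List.any_append]
        have hdrop : (bids.drop (bids.length - tp)).any isContractBid = false :=
          any_all_P _ (by intro x hx; exact drop_trailing bids x (by rwa [htp] at hx))
        rw [hsplit, hdrop, Bool.or_false]
        have : (3 ≤ tp) := by omega
        simp [this]
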